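-- pv_equiv track=rewrite | github.com/omarhashem80/Compilers | lib/utils.py | is_char_inside_range
-- ===== SOURCE A (Python) =====
-- from typing import List, Optional, Tuple
--
-- def is_class_token(token: str) -> bool:
--     return token.startswith("[") and token.endswith("]")
--
-- def parse_ranges(token: str) -> List[Tuple[str, str]]:
--     inner: str = token[1:-1]
--     ranges: List[Tuple[str, str]] = []
--     i: int = 0
--     while i < len(inner):
--         if i + 2 < len(inner) and inner[i + 1] == "-":
--             ranges.append((inner[i], inner[i + 2]))
--             i += 3
--         else:
--             ranges.append((inner[i], inner[i]))
--             i += 1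
--     return ranges
--
-- def is_char_inside_range(char: str, token: str) -> bool:
--     if token == ".":
--         return True
--     if not is_class_token(token) or len(char) != 1:
--         return False
--     for low, high in parse_ranges(token):
--         if low <= char <= high:
--             return True
--     return False
-- ===== SOURCE B (Python) =====
-- def is_char_inside_range(char: str, token: str) -> bool:
--     if token == ".":
--         return True
--     if len(char) != 1 or not (token.startswith("[") and token.endswith("]")):
--         return False
--     # One-character-at-a-time Mealy machine over the class body: no index
--     # arithmetic, no lookahead. pending is None (nothing buffered),
--     # ('h', a) (a literal candidate buffered) or ('d', a) (saw "a-",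
--     # awaiting the range's upper bound).
--     hit = False
--     pending = None
--     for c in token[1:-1]:
--         if pending is None:
--             pending = ('h', c)
--         elif pending[0] == 'h':
--             if c == '-':
--                 pending = ('d', pending[1])
--             else:
--                 hit = hit or pending[1] == char
--                 pending = ('h', c)
--         else:
--             hit = hit or pending[1] <= char <= c
--             pending = None
--     if pending is not None:
--         if pending[0] == 'h':
--             hit = hit or pending[1] == char
--         else:
--             # trailing "a-": both 'a' and '-' are literals
--             hit = hit or pending[1] == char or char == '-'
--     return hit
-- ===== Notes on version B (the rewrite author's own statement) =====
-- stated objective: alternative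
-- what changed: Replaces the index-and-lookahead parse ('i+2 < len and inner[i+1]=="-"' building a list of ranges, then a scan) with a single character-by-character Mealy state machine (states: empty / literal buffered / dash seen) folded over the class body with an OR accumulator and an end-of-input finalizer.
import Mathlib
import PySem

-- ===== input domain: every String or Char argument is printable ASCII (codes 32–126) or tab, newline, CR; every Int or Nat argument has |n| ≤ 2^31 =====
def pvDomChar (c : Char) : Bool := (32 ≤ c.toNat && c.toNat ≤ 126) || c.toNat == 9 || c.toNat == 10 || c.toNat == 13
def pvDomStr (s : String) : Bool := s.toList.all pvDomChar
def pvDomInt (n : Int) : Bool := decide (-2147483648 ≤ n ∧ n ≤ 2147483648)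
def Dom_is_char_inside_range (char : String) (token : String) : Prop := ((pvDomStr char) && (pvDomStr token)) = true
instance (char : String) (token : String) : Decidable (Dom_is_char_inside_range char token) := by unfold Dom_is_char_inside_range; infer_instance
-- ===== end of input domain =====

-- ===== PORT A =====
-- B replaces A's index/lookahead parse into a range list + scan by a one-character-at-a-time
-- state machine folded over the class body (alternative decomposition, same cost).
-- is_class_token(token)
def pvIsClassToken (token : String) : Bool :=
  PySem.Str.startswith token "[" && PySem.Str.endswith token "]"

-- parse_ranges' while loop over inner (the `i + 2 < len(inner)` test = at least 3 chars remain; `inner[i+1] == '-'`)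
def pvParseRanges : List Char → List (Char × Char)
  | [] => []
  | c :: d :: e :: rest =>
      if d = '-' then (c, e) :: pvParseRanges rest
      else (c, c) :: pvParseRanges (d :: e :: rest)
  | c :: rest => (c, c) :: pvParseRanges rest

-- the `for low, high in …: if low <= char <= high: return True` loop; Python's `<=` on
-- single-character strings is exactly Char `≤` (codepoint order)
def pvScanRanges (ch : Char) : List (Char × Char) → Bool
  | [] => false
  | (low, high) :: rest => if low ≤ ch ∧ ch ≤ high then true else pvScanRanges ch rest

def is_char_inside_range (char : String) (token : String) : Bool :=
  if token.toList = ['.'] then true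
  else if ¬ (pvIsClassToken token) then false
  else match char.toList with   -- len(char) != 1 → False; otherwise c is the single character
    | [c] => pvScanRanges c (pvParseRanges (PySem.List.slice token.toList (some 1) (some (-1))))
    | _ => false

-- ===== PORT B =====
-- Source B's loop body: state = (hit accumulator, pending), pending = none | some (false, a) (literal
-- candidate 'a' buffered) | some (true, a) (saw "a-", awaiting the upper bound)
def pvStep (ch : Char) (st : Bool × Option (Bool × Char)) (c : Char) : Bool × Option (Bool × Char) :=
  match st.2 with
  | none => (st.1, some (false, c))
  | some (false, a) =>
      if c = '-' then (st.1, some (true, a))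
      else (st.1 || (a = ch), some (false, c))
  | some (true, a) => (st.1 || (a ≤ ch ∧ ch ≤ c), none)

-- Source B's end-of-input finalizer ('if pending is not None: …')
def pvFinish (ch : Char) (st : Bool × Option (Bool × Char)) : Bool :=
  match st.2 with
  | none => st.1
  | some (false, a) => st.1 || (a = ch)
  | some (true, a) => st.1 || (a = ch) || (ch = '-')

def is_char_inside_range_alt (char : String) (token : String) : Bool :=
  if token.toList = ['.'] then true
  else if char.toList.length ≠ 1 ∨
          ¬ (PySem.Str.startswith token "[" && PySem.Str.endswith token "]") then false
  else
    -- for c in token[1:-1]: … , then the finalizer; char[0] is char.toList.headI (guarded above)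
    pvFinish char.toList.headI
      (List.foldl (pvStep char.toList.headI) (false, none)
        (PySem.List.slice token.toList (some 1) (some (-1))))

-- ===== PRECONDITION & SPEC =====
def Spec_is_char_inside_range (char : String) (token : String) (out : Bool) : Prop := out = is_char_inside_range_alt char token
instance (char : String) (token : String) (out : Bool) : Decidable (Spec_is_char_inside_range char token out) := by unfold Spec_is_char_inside_range; infer_instance

-- ===== CLAIM (what is proved, stated in full; the proofs are below) =====
def Claim_equal_is_char_inside_range : Prop := ∀ (char : String) (token : String), Dom_is_char_inside_range char token → Spec_is_char_inside_range char token (is_char_inside_range char token)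

-- ===== LEMMAS AND PROOFS =====
-- step-evaluation lemmas (one per state of Source B's machine)
theorem pvStep_none (ch : Char) (h : Bool) (c : Char) :
    pvStep ch (h, none) c = (h, some (false, c)) := rfl
theorem pvStep_hold_dash (ch : Char) (h : Bool) (a : Char) :
    pvStep ch (h, some (false, a)) '-' = (h, some (true, a)) := by simp [pvStep]
theorem pvStep_hold (ch : Char) (h : Bool) (a c : Char) (hd : ¬ c = '-') :
    pvStep ch (h, some (false, a)) c = (h || decide (a = ch), some (false, c)) := by
  simp [pvStep, hd]
theorem pvStep_dash (ch : Char) (h : Bool) (a c : Char) :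
    pvStep ch (h, some (true, a)) c = (h || decide (a ≤ ch ∧ ch ≤ c), none) := rfl

-- the state machine folded over l, started with accumulator `hit` and nothing pending,
-- computes `hit OR (scan of A's materialized range list)`
theorem pvFold_eq (ch : Char) (l : List Char) :
    ∀ hit : Bool, pvFinish ch (List.foldl (pvStep ch) (hit, none) l)
      = (hit || pvScanRanges ch (pvParseRanges l)) := by
  induction l using pvParseRanges.induct with
  | case1 => intro hit; simp [pvFinish, pvParseRanges, pvScanRanges]
  | case2 c e rest ih =>
    intro hit
    rw [List.foldl_cons, List.foldl_cons, List.foldl_cons,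
        pvStep_none, pvStep_hold_dash, pvStep_dash, ih]
    simp only [pvParseRanges, if_pos rfl]
    by_cases h : c ≤ ch ∧ ch ≤ e <;> simp [pvScanRanges, h]
  | case3 c d e rest hd ih =>
    intro hit
    have key : List.foldl (pvStep ch) (hit || decide (c = ch), some (false, d)) (e :: rest)
        = List.foldl (pvStep ch) (hit || decide (c = ch), none) (d :: e :: rest) := by
      conv_rhs => rw [List.foldl_cons, pvStep_none]
    rw [List.foldl_cons, List.foldl_cons, pvStep_none, pvStep_hold ch hit c d hd, key, ih]
    simp only [pvParseRanges, if_neg hd, pvScanRanges]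
    have hcc : (c ≤ ch ∧ ch ≤ c) ↔ (c = ch) :=
      ⟨fun ⟨h1, h2⟩ => le_antisymm h1 h2, fun h => by subst h; exact ⟨le_refl _, le_refl _⟩⟩
    by_cases h : c = ch
    · simp [h, hcc]
    · rw [if_neg (by rw [hcc]; exact h)]
      simp [h, Bool.or_assoc]
  | case4 c rest hr ih =>
    intro hit
    match rest with
    | [] => simp [List.foldl, pvStep, pvFinish, pvParseRanges, pvScanRanges,
                  le_antisymm_iff, and_comm, eq_comm]
    | [d] =>
      by_cases hd : d = '-'
      · subst hd
        simp [List.foldl, pvStep, pvFinish, pvParseRanges, pvScanRanges,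
              le_antisymm_iff, and_comm, eq_comm, Bool.or_assoc]
      · simp [List.foldl, pvStep, pvFinish, pvParseRanges, pvScanRanges, hd,
              le_antisymm_iff, and_comm, eq_comm, Bool.or_assoc]
    | a :: b :: l => exact absurd rfl (hr a b l)

-- ===== VERDICT (by name: the statement is the Claim_ definition above) =====
theorem is_char_inside_range_spec : Claim_equal_is_char_inside_range := by
  intro char token _
  unfold Spec_is_char_inside_range is_char_inside_range is_char_inside_range_alt
  by_cases hdot : token.toList = ['.']
  · simp [hdot]
  · simp only [hdot, if_false]
    by_cases hcl : (PySem.Str.startswith token "[" && PySem.Str.endswith token "]") = true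
    · have hA : pvIsClassToken token = true := hcl
      rw [if_neg (by rw [hA]; decide)]
      cases hc : char.toList with
      | nil => rw [if_pos (Or.inl (by simp [hc]))]
      | cons c cs =>
        cases cs with
        | nil =>
          rw [if_neg (by push Not; exact ⟨by simp [hc], hcl⟩)]
          simp only [hc, List.headI]
          exact (pvFold_eq c _ false).symm
        | cons d ds => rw [if_pos (Or.inl (by simp [hc]))]
    · rw [if_pos (show ¬ pvIsClassToken token = true from hcl),
          if_pos (Or.inr hcl)]
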